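-- pv_equiv track=rewrite | github.com/LEVELUP-ML/data-pipeline | dags/processing_dags/strength_features_dag.py | _age_enc
-- ===== SOURCE A (Python) =====
-- AGE_BINS = [(0, 19, 0), (20, 29, 1), (30, 39, 2), (40, 200, 3)]
--
-- def _age_enc(age):
--     try:
--         a = int(age)
--         for lo, hi, code in AGE_BINS:
--             if lo <= a <= hi:
--                 return code
--     except (TypeError, ValueError):
--         pass
--     return -1
-- ===== SOURCE B (Python) =====
-- def _age_enc(age):
--     try:
--         a = int(age)
--     except (TypeError, ValueError):
--         return -1
--     if a < 0 or a > 200: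
--         return -1
--     return (a >= 20) + (a >= 30) + (a >= 40)
-- ===== Notes on version B (the rewrite author's own statement) =====
-- stated objective: simpler
-- what changed: Replaced the scan over the AGE_BINS table with a range guard plus a closed-form arithmetic sum of threshold comparisons.
import Mathlib
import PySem

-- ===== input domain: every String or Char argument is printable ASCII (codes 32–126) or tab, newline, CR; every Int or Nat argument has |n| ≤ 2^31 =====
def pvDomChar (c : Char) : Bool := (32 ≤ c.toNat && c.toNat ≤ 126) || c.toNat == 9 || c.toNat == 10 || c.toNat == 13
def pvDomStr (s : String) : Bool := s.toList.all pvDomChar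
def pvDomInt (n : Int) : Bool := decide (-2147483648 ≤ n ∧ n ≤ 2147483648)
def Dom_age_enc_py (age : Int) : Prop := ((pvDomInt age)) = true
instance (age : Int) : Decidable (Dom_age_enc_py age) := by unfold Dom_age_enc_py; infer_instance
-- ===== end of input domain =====

-- B replaces A's scan over the AGE_BINS table by a range guard and a closed-form
-- sum of threshold comparisons (objective: simpler).

-- ===== PORT A =====
def AGE_BINS : List (Int × Int × Int) := [(0, 19, 0), (20, 29, 1), (30, 39, 2), (40, 200, 3)]

-- the for-loop with early return over AGE_BINS
def age_enc_loop (a : Int) : List (Int × Int × Int) → Int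
  | [] => -1
  | (lo, hi, code) :: rest => if lo ≤ a ∧ a ≤ hi then code else age_enc_loop a rest

def age_enc_py (age : Int) : Int := age_enc_loop age AGE_BINS

-- ===== PORT B =====
def age_enc_py_alt (age : Int) : Int :=
  if age < 0 ∨ age > 200 then -1
  else (if 20 ≤ age then 1 else 0) + (if 30 ≤ age then 1 else 0) + (if 40 ≤ age then 1 else 0)

-- ===== PRECONDITION & SPEC =====
def Spec_age_enc_py (age : Int) (out : Int) : Prop := out = age_enc_py_alt age
instance (age : Int) (out : Int) : Decidable (Spec_age_enc_py age out) := by unfold Spec_age_enc_py; infer_instance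

-- ===== CLAIM (what is proved, stated in full; the proofs are below) =====
def Claim_equal_age_enc_py : Prop := ∀ (age : Int), Dom_age_enc_py age → Spec_age_enc_py age (age_enc_py age)

-- ===== LEMMAS AND PROOFS =====

-- ===== VERDICT (by name: the statement is the Claim_ definition above) =====
theorem age_enc_py_spec : Claim_equal_age_enc_py := by
  intro age _
  unfold Spec_age_enc_py age_enc_py age_enc_py_alt AGE_BINS
  simp only [age_enc_loop]
  split_ifs <;> omega
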